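-- pv_equiv track=rewrite | github.com/hiro-sora/hiro-sora-python-dailylog | daily_log_long_step1.py | count_today_entries
-- ===== SOURCE A (Python) =====
-- def count_today_entries(lines, today):
--     """
--     今日のヘッダー以降にある「ログ行の数」を数えて返す関数
--     """
--     count = 0
--     found_today = False
--
--     for line in lines:
--         if line.strip() == f"--- {today} ---":
--             found_today = True
--             count = 0
--             continue
--         if found_today:
--             if line.strip() != "":
--                 count += 1
--
--     return count
-- ===== SOURCE B (Python) =====
-- def count_today_entries(lines, today):
--     header = f"--- {today} ---"
--     count = 0
--     for line in reversed(lines):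
--         if line.strip() == header:
--             return count
--         if line.strip() != "":
--             count += 1
--     return 0
-- ===== Notes on version B (the rewrite author's own statement) =====
-- stated objective: alternative
-- what changed: Single reverse scan that counts non-empty lines and returns at the first (i.e. last) header, instead of a forward pass with a found-flag that resets the counter at every header.
import Mathlib
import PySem

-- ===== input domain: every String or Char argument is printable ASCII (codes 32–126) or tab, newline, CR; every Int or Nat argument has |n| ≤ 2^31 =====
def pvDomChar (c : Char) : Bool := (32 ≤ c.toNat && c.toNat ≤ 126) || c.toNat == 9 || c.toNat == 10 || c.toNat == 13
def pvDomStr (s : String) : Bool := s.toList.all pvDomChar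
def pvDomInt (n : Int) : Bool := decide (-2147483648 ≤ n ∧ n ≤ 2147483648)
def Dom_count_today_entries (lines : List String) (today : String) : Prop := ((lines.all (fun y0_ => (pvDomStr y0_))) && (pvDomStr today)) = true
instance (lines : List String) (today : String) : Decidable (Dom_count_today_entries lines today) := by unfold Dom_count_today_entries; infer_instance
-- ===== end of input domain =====

-- B replaces A's forward pass with a found-flag and counter resets by a single reverse
-- scan that returns the running count at the first header seen (alternative decomposition).


-- ===== PORT A =====
-- state = (count, found_today); one step per line, branches in A's order
def pvStepA (today : String) (s : Int × Bool) (line : String) : Int × Bool :=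
  if PySem.Str.strip line = "--- " ++ today ++ " ---" then (0, true)
  else if s.2 then (if PySem.Str.strip line ≠ "" then (s.1 + 1, s.2) else s)
  else s

def count_today_entries (lines : List String) (today : String) : Int :=
  (lines.foldl (pvStepA today) (0, false)).1

-- ===== PORT B =====
-- reverse scan: return count at the first header seen, else 0
def pvRevGo (header : String) : List String → Int → Int
  | [], _ => 0
  | line :: rest, count =>
    if PySem.Str.strip line = header then count
    else pvRevGo header rest (if PySem.Str.strip line ≠ "" then count + 1 else count)

def count_today_entries_alt (lines : List String) (today : String) : Int :=
  pvRevGo ("--- " ++ today ++ " ---") lines.reverse 0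

-- ===== PRECONDITION & SPEC =====
def Spec_count_today_entries (lines : List String) (today : String) (out : Int) : Prop := out = count_today_entries_alt lines today
instance (lines : List String) (today : String) (out : Int) : Decidable (Spec_count_today_entries lines today out) := by unfold Spec_count_today_entries; infer_instance

-- ===== CLAIM (what is proved, stated in full; the proofs are below) =====
def Claim_equal_count_today_entries : Prop := ∀ (lines : List String) (today : String), Dom_count_today_entries lines today → Spec_count_today_entries lines today (count_today_entries lines today)

-- ===== LEMMAS AND PROOFS =====
-- Main invariant, by induction on lines from the right: the reverse scan with
-- accumulator n equals A's fold result plus n when A's flag is set, else 0;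
-- and A's count is 0 while the flag is unset.
theorem pvMain (today : String) (lines : List String) : ∀ n : Int,
    pvRevGo ("--- " ++ today ++ " ---") lines.reverse n =
      (if (lines.foldl (pvStepA today) (0, false)).2 then
        (lines.foldl (pvStepA today) (0, false)).1 + n else 0)
    ∧ ((lines.foldl (pvStepA today) (0, false)).2 = false →
        (lines.foldl (pvStepA today) (0, false)).1 = 0) := by
  induction lines using List.reverseRecOn with
  | nil => intro n; simp [pvRevGo]
  | append_singleton ys x ih =>
    intro n
    rw [List.reverse_append]
    simp only [List.reverse_singleton, List.singleton_append, List.foldl_append, List.foldl_cons,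
      List.foldl_nil]
    set s := ys.foldl (pvStepA today) (0, false) with hs
    simp only [pvRevGo]
    unfold pvStepA
    by_cases hx : PySem.Str.strip x = "--- " ++ today ++ " ---"
    · simp [hx]
    · by_cases hf : s.2
      · by_cases he : PySem.Str.strip x = ""
        · have := (ih n).1
          simp [hf, he, this]
        · have := (ih (n + 1)).1
          simp only [hx, hf, he, if_false, if_true, ite_not] at this ⊢
          simp [this]
          ring
      · have hf' : s.2 = false := by simpa using hf
        have h0 := (ih n).2 hf'
        have h1 := (ih (if PySem.Str.strip x = "" then n else n + 1)).1
        simp [hx, hf', h0] at h1 ⊢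
        exact h1

-- ===== VERDICT (by name: the statement is the Claim_ definition above) =====
theorem count_today_entries_spec : Claim_equal_count_today_entries := by
  intro lines today _
  unfold Spec_count_today_entries count_today_entries count_today_entries_alt
  obtain ⟨h1, h2⟩ := pvMain today lines 0
  rw [h1]
  by_cases hf : (lines.foldl (pvStepA today) (0, false)).2
  · simp [hf]
  · simp [hf, h2 (by simpa using hf)]
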